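-- pv_equiv track=rewrite | github.com/Arcensoth/blueprints | mcblueprints/utils/__init__.py | charmap_from_str
-- ===== SOURCE A (Python) =====
-- def charmap_from_str(value: str) -> list[list[str]]:
--     charmap: list[list[str]] = []
--     layer: list[str] = []
--     for line in value.splitlines():
--         if line:
--             layer.append(line)
--         else:
--             charmap.append(layer)
--             layer = []
--     charmap.append(layer)
--     return list(reversed(charmap))
-- ===== SOURCE B (Python) =====
-- def charmap_from_str(value: str) -> list[list[str]]:
--     # Single pass over the lines in reverse: the output (which A produces by
--     # reversing at the end) is built directly, prepending lines into the last
--     # group; no flush branch and no final reversal.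
--     result = [[]]
--     for line in reversed(value.splitlines()):
--         if line:
--             result[-1] = [line] + result[-1]
--         else:
--             result.append([])
--     return result
-- ===== Notes on version B (the rewrite author's own statement) =====
-- stated objective: alternative
-- what changed: B makes one pass over the lines in reverse, building the final (reversed) group list directly by prepending each line into the last group and appending a new empty group on a blank line, instead of A's forward accumulate/flush loop with a trailing flush and a final reversal.
import Mathlib
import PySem

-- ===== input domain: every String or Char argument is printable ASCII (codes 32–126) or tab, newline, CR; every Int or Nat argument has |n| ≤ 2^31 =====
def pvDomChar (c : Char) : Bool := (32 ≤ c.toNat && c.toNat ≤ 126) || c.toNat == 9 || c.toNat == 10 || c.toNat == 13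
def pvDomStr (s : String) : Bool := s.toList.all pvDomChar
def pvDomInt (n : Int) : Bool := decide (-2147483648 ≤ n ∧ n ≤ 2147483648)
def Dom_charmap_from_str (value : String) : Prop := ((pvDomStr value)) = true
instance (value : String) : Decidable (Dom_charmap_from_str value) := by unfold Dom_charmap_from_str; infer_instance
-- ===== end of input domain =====

-- B builds the reversed group list in one reverse pass (prepend into the last group / append a new group); no flush step, no final reversal.

-- ===== PORT A =====
def charmap_from_str (value : String) : List (List String) :=
  let r := (PySem.Str.splitlines value).foldl
    (fun (st : List (List String) × List String) (line : String) =>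
      if line ≠ "" then (st.1, st.2 ++ [line]) else (st.1 ++ [st.2], ([] : List String)))
    ([], [])
  (r.1 ++ [r.2]).reverse

-- ===== PORT B =====
-- result[-1] = [line] + result[-1]  (replace the last element of the list)
def pvSetLastPre (line : String) : List (List String) → List (List String)
  | [] => []
  | [g] => [[line] ++ g]
  | g :: gs => g :: pvSetLastPre line gs

def charmap_from_str_alt (value : String) : List (List String) :=
  (PySem.Str.splitlines value).reverse.foldl
    (fun (result : List (List String)) (line : String) =>
      if line ≠ "" then pvSetLastPre line result else result ++ [[]])
    [[]]

-- ===== PRECONDITION & SPEC =====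
def Spec_charmap_from_str (value : String) (out : List (List String)) : Prop := out = charmap_from_str_alt value
instance (value : String) (out : List (List String)) : Decidable (Spec_charmap_from_str value out) := by unfold Spec_charmap_from_str; infer_instance

-- ===== CLAIM (what is proved, stated in full; the proofs are below) =====
def Claim_equal_charmap_from_str : Prop := ∀ (value : String), Dom_charmap_from_str value → Spec_charmap_from_str value (charmap_from_str value)

-- ===== LEMMAS AND PROOFS =====

-- forward grouping specification; both ports are proved equal to its reverse
def pvMapHead (f : List String → List String) : List (List String) → List (List String)
  | [] => []
  | g :: gs => f g :: gs

def pvMapLast (f : List String → List String) : List (List String) → List (List String)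
  | [] => []
  | [g] => [f g]
  | g :: gs => g :: pvMapLast f gs

def pvS : List String → List (List String)
  | [] => [[]]
  | l :: t => if l ≠ "" then pvMapHead (fun g => l :: g) (pvS t) else [] :: pvS t

theorem pvS_ne_nil (ls : List String) : pvS ls ≠ [] := by
  induction ls with
  | nil => simp [pvS]
  | cons l t ih =>
    simp only [pvS]
    split
    · cases h : pvS t with
      | nil => exact absurd h ih
      | cons g gs => simp [pvMapHead]
    · simp

theorem pvMapLast_cons (f : List String → List String) (a : List String)
    (l : List (List String)) (h : l ≠ []) :
    pvMapLast f (a :: l) = a :: pvMapLast f l := by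
  cases l with
  | nil => exact absurd rfl h
  | cons b l => rfl

theorem pvMapLast_ne_nil (f : List String → List String) (l : List (List String))
    (h : l ≠ []) : pvMapLast f l ≠ [] := by
  cases l with
  | nil => exact absurd rfl h
  | cons a t => cases t <;> simp [pvMapLast]

theorem pvMapLast_append_singleton (f : List String → List String)
    (rs : List (List String)) (g : List String) :
    pvMapLast f (rs ++ [g]) = rs ++ [f g] := by
  induction rs with
  | nil => rfl
  | cons a rs ih =>
    rw [List.cons_append, pvMapLast_cons f a (rs ++ [g]) (by simp), ih, List.cons_append]

theorem pvMapLast_append_nil (xs : List (List String)) :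
    pvMapLast (fun g => g ++ []) xs = xs := by
  induction xs with
  | nil => rfl
  | cons a l ih =>
    cases l with
    | nil => simp [pvMapLast]
    | cons b l' => rw [pvMapLast_cons _ _ _ (by simp), ih]

theorem pvMapLast_mapLast (m : String) (g : List String) (xs : List (List String)) :
    pvMapLast (fun x => x ++ g) (pvMapLast (fun x => x ++ [m]) xs)
      = pvMapLast (fun x => x ++ ([m] ++ g)) xs := by
  induction xs with
  | nil => rfl
  | cons a l ih =>
    cases l with
    | nil => simp [pvMapLast]
    | cons b l' =>
      rw [pvMapLast_cons (fun x => x ++ [m]) a (b :: l') (by simp),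
        pvMapLast_cons (fun x => x ++ g) a _ (pvMapLast_ne_nil _ _ (by simp)),
        pvMapLast_cons (fun x => x ++ ([m] ++ g)) a (b :: l') (by simp), ih]

theorem pvMapHead_mapLast_comm (l m : String) (xs : List (List String)) :
    pvMapHead (fun g => l :: g) (pvMapLast (fun g => g ++ [m]) xs)
      = pvMapLast (fun g => g ++ [m]) (pvMapHead (fun g => l :: g) xs) := by
  cases xs with
  | nil => rfl
  | cons a t =>
    cases t with
    | nil => simp [pvMapHead, pvMapLast]
    | cons b t' => rfl

theorem pvMapHead_append_left (f : List String → List String)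
    (xs : List (List String)) (h : xs ≠ []) (ys : List (List String)) :
    pvMapHead f (xs ++ ys) = pvMapHead f xs ++ ys := by
  cases xs with
  | nil => exact absurd rfl h
  | cons a t => rfl

theorem pvMapHead_nil_append (xs : List (List String)) :
    pvMapHead (fun g => [] ++ g) xs = xs := by
  cases xs <;> simp [pvMapHead]

theorem pvMapHead_head_assoc (ly : List String) (l : String) (xs : List (List String)) :
    pvMapHead (fun g => ly ++ g) (pvMapHead (fun g => l :: g) xs)
      = pvMapHead (fun g => (ly ++ [l]) ++ g) xs := by
  cases xs <;> simp [pvMapHead]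

theorem pvSetLastPre_append (line : String) (rs : List (List String)) (g : List String) :
    pvSetLastPre line (rs ++ [g]) = rs ++ [[line] ++ g] := by
  induction rs with
  | nil => rfl
  | cons a rs ih =>
    cases rs with
    | nil => rfl
    | cons b rs' =>
      simp only [List.cons_append] at ih ⊢
      rw [show pvSetLastPre line (a :: b :: (rs' ++ [g]))
            = a :: pvSetLastPre line (b :: (rs' ++ [g])) from rfl, ih]

theorem pvS_append_ne (ls : List String) (m : String) (hm : m ≠ "") :
    pvS (ls ++ [m]) = pvMapLast (fun g => g ++ [m]) (pvS ls) := by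
  induction ls with
  | nil => simp [pvS, hm, pvMapHead, pvMapLast]
  | cons l t ih =>
    by_cases hl : l = ""
    · subst hl
      simp only [List.cons_append, pvS, ne_eq, not_true_eq_false, if_false, ih]
      rw [pvMapLast_cons _ _ _ (pvS_ne_nil t)]
    · simp only [List.cons_append, pvS, ne_eq, hl, not_false_eq_true, if_true, ih]
      exact pvMapHead_mapLast_comm l m (pvS t)

theorem pvS_append_blank (ls : List String) :
    pvS (ls ++ [""]) = pvS ls ++ [[]] := by
  induction ls with
  | nil => simp [pvS]
  | cons l t ih =>
    by_cases hl : l = ""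
    · subst hl
      simp only [List.cons_append, pvS, ne_eq, not_true_eq_false, if_false, ih]
    · simp only [List.cons_append, pvS, ne_eq, hl, not_false_eq_true, if_true, ih]
      exact pvMapHead_append_left _ _ (pvS_ne_nil t) _

-- characterisation of A's fold
theorem pvA_char (ls : List String) (cm : List (List String)) (ly : List String) :
    (ls.foldl
        (fun (st : List (List String) × List String) (line : String) =>
          if line ≠ "" then (st.1, st.2 ++ [line]) else (st.1 ++ [st.2], ([] : List String)))
        (cm, ly)).1
      ++ [(ls.foldl
        (fun (st : List (List String) × List String) (line : String) =>
          if line ≠ "" then (st.1, st.2 ++ [line]) else (st.1 ++ [st.2], ([] : List String)))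
        (cm, ly)).2]
    = cm ++ pvMapHead (fun g => ly ++ g) (pvS ls) := by
  induction ls generalizing cm ly with
  | nil => simp [pvS, pvMapHead]
  | cons l t ih =>
    by_cases hl : l = ""
    · subst hl
      rw [List.foldl_cons, if_neg (by simp), ih, pvMapHead_nil_append]
      simp only [pvS, ne_eq, not_true_eq_false, if_false, pvMapHead]
      simp
    · rw [List.foldl_cons, if_pos hl, ih]
      simp only [pvS, ne_eq, hl, not_false_eq_true, if_true]
      rw [pvMapHead_head_assoc]

-- characterisation of B's fold
theorem pvB_char (ms : List String) (rs : List (List String)) (g : List String) :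
    (ms.foldl
      (fun (result : List (List String)) (line : String) =>
        if line ≠ "" then pvSetLastPre line result else result ++ [[]])
      (rs ++ [g]))
    = rs ++ (pvMapLast (fun x => x ++ g) (pvS ms.reverse)).reverse := by
  induction ms generalizing rs g with
  | nil => simp [pvS, pvMapLast]
  | cons m t ih =>
    by_cases hm : m = ""
    · subst hm
      rw [List.foldl_cons, if_neg (by simp), List.append_assoc rs [g] [[]],
        show ([g] ++ [[]] : List (List String)) = [g] ++ [([] : List String)] from rfl]
      rw [show rs ++ ([g] ++ [([] : List String)]) = (rs ++ [g]) ++ [([] : List String)] from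
        (List.append_assoc rs [g] [[]]).symm]
      rw [ih (rs ++ [g]) [], pvMapLast_append_nil, List.reverse_cons, pvS_append_blank,
        pvMapLast_append_singleton]
      simp
    · rw [List.foldl_cons, if_pos hm, pvSetLastPre_append, ih rs ([m] ++ g),
        List.reverse_cons, pvS_append_ne _ m hm, pvMapLast_mapLast]

-- ===== VERDICT (by name: the statement is the Claim_ definition above) =====
theorem charmap_from_str_spec : Claim_equal_charmap_from_str := by
  intro value _
  unfold Spec_charmap_from_str charmap_from_str charmap_from_str_alt
  have hB := pvB_char (PySem.Str.splitlines value).reverse [] []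
  simp only [List.nil_append, List.reverse_reverse] at hB
  rw [hB, pvMapLast_append_nil]
  show (((PySem.Str.splitlines value).foldl
      (fun (st : List (List String) × List String) (line : String) =>
        if line ≠ "" then (st.1, st.2 ++ [line]) else (st.1 ++ [st.2], ([] : List String)))
      ([], [])).1
    ++ [((PySem.Str.splitlines value).foldl
      (fun (st : List (List String) × List String) (line : String) =>
        if line ≠ "" then (st.1, st.2 ++ [line]) else (st.1 ++ [st.2], ([] : List String)))
      ([], [])).2]).reverse = (pvS (PySem.Str.splitlines value)).reverse
  rw [pvA_char, pvMapHead_nil_append, List.nil_append]
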